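-- pv_equiv track=rewrite | github.com/hsn8086/exam | 25lq/solution/I_链.py | is_chain
-- ===== SOURCE A (Python) =====
-- from collections.abc import Mapping
--
-- def is_chain(n:int, m:int, edges: Mapping) -> bool:
--     if n == 1:
--         return m == 0
--     if m != n-1:  # 链必须有n-1条边
--         return False
--
--     # 构建邻接矩阵
--     matrix = [[] for _ in range(n+1)]
--     for u, v in edges:
--         matrix[u].append(v)
--         matrix[v].append(u)
--
--     # 检查度数并统计度数为1的点
--     degree_one = 0
--     for i in range(1, n+1):
--         deg = len(matrix[i])
--         if deg > 2:
--             return False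
--         if deg == 1:
--             degree_one += 1
--
--     # 链必须有2个端点
--     if degree_one != 2:
--         return False
--
--     # 找到起点（度数为1的点）
--     for i in range(1, n+1):
--         if len(matrix[i]) == 1:
--             start = i
--             break
--
--     # DFS检查连通性和路径
--     visited = [False] * (n+1)
--     path_len = 0
--     curr_node = start
--     prev_node = 0
--
--     while curr_node != 0:
--         visited[curr_node] = True
--         path_len += 1
--
--         next_node = 0
--         for neighbor in matrix[curr_node]:
--             if neighbor != prev_node and not visited[neighbor]:
--                 next_node = neighbor
--                 break
--
--         prev_node = curr_node
--         curr_node = next_node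
--
--     return path_len == n
-- ===== SOURCE B (Python) =====
-- def is_chain(n: int, m: int, edges) -> bool:
--     if n == 1:
--         return m == 0
--     if m != n - 1:
--         return False
--     # degree counter built from the flattened endpoint list (no adjacency structure)
--     deg = {}
--     for x in [w for e in edges for w in e]:
--         deg[x] = deg.get(x, 0) + 1
--     ends = 0
--     for i in range(1, n + 1):
--         d = deg.get(i, 0)
--         if d > 2:
--             return False
--         if d == 1:
--             ends += 1
--     if ends != 2:
--         return False
--     # connectivity by fixpoint closure from vertex 1 over the raw edge list
--     reach = [False] * (n + 1)
--     reach[1] = True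
--     for _ in range(n):
--         for u, v in edges:
--             if reach[u] or reach[v]:
--                 reach[u] = True
--                 reach[v] = True
--     return all(reach[i] for i in range(1, n + 1))
-- ===== Notes on version B (the rewrite author's own statement) =====
-- stated objective: alternative
-- what changed: Replaced A's adjacency-list construction plus endpoint-to-endpoint prev/next chain walk by a flat degree counter over the edge list and a fixpoint reachability closure from vertex 1 scanning the raw edge list; Pre_ excludes edge endpoints outside 1..n, where A either raises IndexError or silently wraps negative indices into other matrix rows.
-- outside the precondition, e.g. on is_chain(2, 1, [(-1, 1)]): A returns True, B returns False; on is_chain(3, 2, [(1, 2), (2, 4)]): A raises IndexError, B returns False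
import Mathlib
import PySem

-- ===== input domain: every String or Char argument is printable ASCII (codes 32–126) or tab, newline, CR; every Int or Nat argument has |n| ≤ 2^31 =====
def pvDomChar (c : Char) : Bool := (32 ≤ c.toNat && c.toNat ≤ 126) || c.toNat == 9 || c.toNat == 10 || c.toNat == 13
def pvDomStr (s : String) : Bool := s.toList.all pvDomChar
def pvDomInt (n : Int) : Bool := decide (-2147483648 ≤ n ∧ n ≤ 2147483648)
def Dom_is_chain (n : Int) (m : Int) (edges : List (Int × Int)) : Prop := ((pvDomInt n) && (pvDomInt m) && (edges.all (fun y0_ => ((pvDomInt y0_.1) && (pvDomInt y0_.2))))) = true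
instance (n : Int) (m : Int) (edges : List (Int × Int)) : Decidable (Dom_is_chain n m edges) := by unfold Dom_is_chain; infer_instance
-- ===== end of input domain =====

-- B replaces A's adjacency-list chain walk by a degree counter plus a fixpoint
-- reachability closure from vertex 1 (objective: alternative; no speed claim).

-- ===== PORT A =====

-- Python xs[i] with a default (index in range under Pre_)
def pvGetL (xs : List (List Int)) (i : Int) : List Int := PySem.List.pyGetD xs i []

def pvGetB (xs : List Bool) (i : Int) : Bool := PySem.List.pyGetD xs i false

-- matrix[u].append(v); matrix[v].append(u)
def pvAddEdge (mat : List (List Int)) (p : Int × Int) : List (List Int) :=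
  let m1 := PySem.List.pySetD mat p.1 (pvGetL mat p.1 ++ [p.2])
  PySem.List.pySetD m1 p.2 (pvGetL m1 p.2 ++ [p.1])

-- the degree-checking loop with its early 'return False' (none = returned False)
def pvDegLoop (matrix : List (List Int)) (n : Int) : Option Int :=
  (PySem.List.pyRange 1 (n+1) 1).foldl
    (fun acc i =>
      match acc with
      | none => none
      | some c =>
        let deg := (pvGetL matrix i).length
        if deg > 2 then none
        else if deg = 1 then some (c+1) else some c)
    (some 0)

-- the while-loop; fuel only makes it total (it is never exhausted under Pre_)
def pvWalk (matrix : List (List Int)) : Nat → List Bool → Int → Int → Int → Int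
  | 0, _, pl, _, _ => pl
  | fuel+1, visited, pl, prev, curr =>
    if curr = 0 then pl
    else
      let visited' := PySem.List.pySetD visited curr true
      let next := ((pvGetL matrix curr).find?
          (fun nb => nb != prev && !(pvGetB visited' nb))).getD 0
      pvWalk matrix fuel visited' (pl+1) curr next

def is_chain (n : Int) (m : Int) (edges : List (Int × Int)) : Bool :=
  if n = 1 then decide (m = 0)
  else if m ≠ n - 1 then false
  else
    let matrix := edges.foldl pvAddEdge (List.replicate (n+1).toNat [])
    match pvDegLoop matrix n with
    | none => false
    | some degree_one =>
      if degree_one ≠ 2 then false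
      else
        match (PySem.List.pyRange 1 (n+1) 1).find?
            (fun i => (pvGetL matrix i).length == 1) with
        | none => false  -- Python would hit NameError here; unreachable (degree_one = 2)
        | some start =>
          decide (pvWalk matrix (n+1).toNat (List.replicate (n+1).toNat false) 0 0 start = n)

-- ===== PORT B =====

def pvEndsLoop (deg : PySem.Dict Int Int) (n : Int) : Option Int :=
  (PySem.List.pyRange 1 (n+1) 1).foldl
    (fun acc i =>
      match acc with
      | none => none
      | some c =>
        let d := deg.getD i 0
        if d > 2 then none
        else if d = 1 then some (c+1) else some c)
    (some 0)

-- one pass of 'for u, v in edges: if reach[u] or reach[v]: reach[u] = reach[v] = True'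
def pvRound (reach : List Bool) (edges : List (Int × Int)) : List Bool :=
  edges.foldl
    (fun r p =>
      if pvGetB r p.1 || pvGetB r p.2 then
        PySem.List.pySetD (PySem.List.pySetD r p.1 true) p.2 true
      else r) reach

def is_chain_alt (n : Int) (m : Int) (edges : List (Int × Int)) : Bool :=
  if n = 1 then decide (m = 0)
  else if m ≠ n - 1 then false
  else
    let deg := (edges.flatMap (fun p => [p.1, p.2])).foldl
      (fun d x => d.modify x 0 (· + 1)) PySem.Dict.empty
    match pvEndsLoop deg n with
    | none => false
    | some ends =>
      if ends ≠ 2 then false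
      else
        let reach := (List.range n.toNat).foldl
          (fun r _ => pvRound r edges)
          (PySem.List.pySetD (List.replicate (n+1).toNat false) 1 true)
        (PySem.List.pyRange 1 (n+1) 1).all (fun i => pvGetB reach i)

-- ===== PRECONDITION & SPEC =====
-- Pre_ excludes only edge lists that A actually indexes (n ≠ 1, m = n-1) containing an
-- endpoint outside 1..n: there A raises IndexError or silently wraps a negative index
-- into another matrix row (an artefact of Python list indexing).
def Pre_is_chain (n : Int) (m : Int) (edges : List (Int × Int)) : Prop :=
  n = 1 ∨ m ≠ n - 1 ∨ (∀ p ∈ edges, 1 ≤ p.1 ∧ p.1 ≤ n ∧ 1 ≤ p.2 ∧ p.2 ≤ n)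
instance (n : Int) (m : Int) (edges : List (Int × Int)) : Decidable (Pre_is_chain n m edges) := by
  unfold Pre_is_chain; infer_instance

def pvWitness_is_chain : Int × Int × (List (Int × Int)) := (3, 2, [(1, 2), (2, 3)])

def Spec_is_chain (n : Int) (m : Int) (edges : List (Int × Int)) (out : Bool) : Prop := out = is_chain_alt n m edges
instance (n : Int) (m : Int) (edges : List (Int × Int)) (out : Bool) : Decidable (Spec_is_chain n m edges out) := by unfold Spec_is_chain; infer_instance

-- ===== CLAIM (what is proved, stated in full; the proofs are below) =====
def Claim_equal_is_chain : Prop := ∀ (n : Int) (m : Int) (edges : List (Int × Int)), Dom_is_chain n m edges → Pre_is_chain n m edges → Spec_is_chain n m edges (is_chain n m edges)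

-- ===== LEMMAS AND PROOFS =====

-- neighbour list of vertex i, in the order A's matrix row for i receives entries
def pvNbrs (E : List (Int × Int)) (i : Int) : List Int :=
  E.flatMap (fun p => (if p.1 = i then [p.2] else []) ++ (if p.2 = i then [p.1] else []))

def pvAdj (E : List (Int × Int)) (x y : Int) : Prop := (x, y) ∈ E ∨ (y, x) ∈ E

def pvReach (E : List (Int × Int)) : Int → Int → Prop := Relation.ReflTransGen (pvAdj E)

-- generic get/set bridge (nonnegative indices)
theorem pvGetD_setD {α : Type} (xs : List α) (i j : Int) (v d : α)
    (h0 : 0 ≤ i) (h1 : i < xs.length) (h2 : 0 ≤ j) :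
    PySem.List.pyGetD (PySem.List.pySetD xs i v) j d
      = if j = i then v else PySem.List.pyGetD xs j d := by
  obtain ⟨a, rfl⟩ : ∃ a : Nat, (a : Int) = i := ⟨i.toNat, by omega⟩
  obtain ⟨b, rfl⟩ : ∃ b : Nat, (b : Int) = j := ⟨j.toNat, by omega⟩
  rw [PySem.List.pyGetD_pySetD_natCast xs a b v d (by exact_mod_cast h1)]
  split_ifs with hx hy hy <;> simp_all

theorem pvGetD_replicate {α : Type} (N : Nat) (d : α) (i : Int) (h : 0 ≤ i) :
    PySem.List.pyGetD (List.replicate N d) i d = d := by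
  obtain ⟨a, rfl⟩ : ∃ a : Nat, (a : Int) = i := ⟨i.toNat, by omega⟩
  rw [PySem.List.pyGetD_natCast]
  by_cases ha : a < N
  · simp [List.getD, ha]
  · rw [List.getD_eq_default]; simpa using Nat.le_of_not_lt ha

theorem pvAdj_symm (E : List (Int × Int)) {x y : Int} (h : pvAdj E x y) : pvAdj E y x := by
  unfold pvAdj at *; tauto

theorem pvMem_nbrs {E : List (Int × Int)} {i y : Int} : y ∈ pvNbrs E i ↔ pvAdj E i y := by
  simp only [pvNbrs, pvAdj, List.mem_flatMap]
  constructor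
  · rintro ⟨p, hp, hmem⟩
    rcases List.mem_append.1 hmem with h | h <;> [skip; skip] <;>
      · split at h <;> simp_all <;> subst_vars <;> simp_all
  · rintro (h | h)
    · exact ⟨(i, y), h, by simp⟩
    · exact ⟨(y, i), h, by simp⟩

theorem pvNbrs_bounds {n : Int} {E : List (Int × Int)}
    (hE : ∀ p ∈ E, 1 ≤ p.1 ∧ p.1 ≤ n ∧ 1 ≤ p.2 ∧ p.2 ≤ n)
    {i y : Int} (hy : y ∈ pvNbrs E i) : 1 ≤ y ∧ y ≤ n := by
  rcases pvMem_nbrs.1 hy with h | h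
  · exact ⟨(hE _ h).2.2.1, (hE _ h).2.2.2⟩
  · exact ⟨(hE _ h).1, (hE _ h).2.1⟩

theorem pvReach_bounds {n : Int} {E : List (Int × Int)}
    (hE : ∀ p ∈ E, 1 ≤ p.1 ∧ p.1 ≤ n ∧ 1 ≤ p.2 ∧ p.2 ≤ n)
    {s z : Int} (hs1 : 1 ≤ s) (hs2 : s ≤ n) (h : pvReach E s z) : 1 ≤ z ∧ z ≤ n := by
  induction h with
  | refl => exact ⟨hs1, hs2⟩
  | tail _ hadj ih =>
    rename_i b c _
    exact pvNbrs_bounds hE (pvMem_nbrs.2 hadj)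

-- the built matrix: length and rows
theorem pvMatrix_get {n : Int} (E : List (Int × Int)) (mat : List (List Int))
    (hlen : (mat.length : Int) = n + 1)
    (hE : ∀ p ∈ E, 1 ≤ p.1 ∧ p.1 ≤ n ∧ 1 ≤ p.2 ∧ p.2 ≤ n)
    (i : Int) (h0 : 0 ≤ i) :
    pvGetL (E.foldl pvAddEdge mat) i = pvGetL mat i ++ pvNbrs E i := by
  induction E generalizing mat with
  | nil => simp [pvNbrs]
  | cons p E ih =>
    have hp := hE p (by simp)
    have hstep : pvGetL (pvAddEdge mat p) i
        = pvGetL mat i ++ ((if p.1 = i then [p.2] else []) ++ (if p.2 = i then [p.1] else [])) := by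
      have hl0 : (mat.length : Int) = n + 1 := hlen
      simp only [pvAddEdge, pvGetL]
      rw [pvGetD_setD _ p.2 i _ _ (by omega) (by rw [PySem.List.length_pySetD]; omega) h0,
          pvGetD_setD _ p.1 p.2 _ _ (by omega) (by omega) (by omega),
          pvGetD_setD _ p.1 i _ _ (by omega) (by omega) h0]
      by_cases h1 : i = p.1 <;> by_cases h2 : i = p.2 <;> by_cases h3 : p.2 = p.1 <;>
        simp [h1, h2, h3, eq_comm] <;> simp_all <;> omega
    rw [List.foldl_cons, ih (pvAddEdge mat p)
        (by simp only [pvAddEdge]; rw [PySem.List.length_pySetD, PySem.List.length_pySetD]; exact hlen)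
        (fun q hq => hE q (by simp [hq])), hstep]
    simp [pvNbrs, List.flatMap_cons, List.append_assoc]

-- the option-loop characterisation (shared shape of pvDegLoop / pvEndsLoop)
theorem pvOptLoop_char (g : Int → Int) (L : List Int) :
    ∀ c : Int,
    (L.foldl
      (fun acc i =>
        match acc with
        | none => none
        | some c => if g i > 2 then none else if g i = 1 then some (c+1) else some c)
      (some c))
    = if ∀ i ∈ L, g i ≤ 2 then some (c + (L.countP (fun i => decide (g i = 1)) : Int)) else none := by
  induction L with
  | nil => simp
  | cons x L ih =>
    intro c
    have hnone : ∀ (L' : List Int), (List.foldl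
        (fun acc i =>
          match acc with
          | none => none
          | some c => if g i > 2 then none else if g i = 1 then some (c+1) else some c)
        (none : Option Int) L') = none := by
      intro L'; induction L' with
      | nil => rfl
      | cons y L' ih' => simpa using ih'
    rw [List.foldl_cons]
    have hred : (match (some c : Option Int) with
        | none => (none : Option Int)
        | some c => if g x > 2 then none else if g x = 1 then some (c+1) else some c)
        = if g x > 2 then none else if g x = 1 then some (c+1) else some c := rfl
    rw [hred]
    by_cases hx : g x > 2
    · rw [if_pos hx, if_neg (by intro h; exact absurd (h x (by simp)) (by omega))]
      exact hnone L
    · have hx2 : g x ≤ 2 := by omega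
      by_cases h1 : g x = 1
      · rw [if_neg hx, if_pos h1, ih (c+1)]
        by_cases hall : ∀ i ∈ L, g i ≤ 2
        · rw [if_pos hall, if_pos (by intro i hi; rcases List.mem_cons.1 hi with rfl | hi; exact hx2; exact hall i hi)]
          simp [List.countP_cons, h1]
          push_cast; ring
        · rw [if_neg hall, if_neg (by intro h; exact hall (fun i hi => h i (by simp [hi])))]
      · rw [if_neg hx, if_neg h1, ih c]
        by_cases hall : ∀ i ∈ L, g i ≤ 2
        · rw [if_pos hall, if_pos (by intro i hi; rcases List.mem_cons.1 hi with rfl | hi; exact hx2; exact hall i hi)]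
          simp [List.countP_cons, h1]
        · rw [if_neg hall, if_neg (by intro h; exact hall (fun i hi => h i (by simp [hi])))]

-- walk on next = 0 or exhausted fuel returns pl
theorem pvWalk_zero (matrix : List (List Int)) (fuel : Nat) (v : List Bool) (pl prev : Int) :
    pvWalk matrix fuel v pl prev 0 = pl := by
  cases fuel <;> simp [pvWalk]

theorem pvTwoMem {l : List Int} {a b : Int} (hlen : l.length ≤ 2)
    (ha : a ∈ l) (hb : b ∈ l) (hne : b ≠ a) : ∀ y ∈ l, y = a ∨ y = b := by
  match l, hlen with
  | [], _ => simp at ha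
  | [x], _ => simp_all
  | [x, y], _ =>
    simp only [List.mem_cons, List.mem_singleton, List.not_mem_nil, or_false] at *
    rcases ha with rfl | rfl <;> rcases hb with rfl | rfl <;> tauto

-- ===== the walk invariant =====
theorem pvWalk_inv {n : Int} {E : List (Int × Int)} {matrix : List (List Int)} {s : Int}
    (hE : ∀ p ∈ E, 1 ≤ p.1 ∧ p.1 ≤ n ∧ 1 ≤ p.2 ∧ p.2 ≤ n)
    (hmat : ∀ i : Int, 1 ≤ i → i ≤ n → pvGetL matrix i = pvNbrs E i)
    (hdeg : ∀ i : Int, 1 ≤ i → i ≤ n → (pvNbrs E i).length ≤ 2)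
    (hs1 : 1 ≤ s) (hs2 : s ≤ n) :
    ∀ (fuel : Nat) (visited : List Bool) (pl prev curr : Int) (Vs : Finset Int),
    (visited.length : Int) = n + 1 →
    (∀ i : Int, 0 ≤ i → (pvGetB visited i = true ↔ i ∈ Vs)) →
    (∀ x ∈ Vs, 1 ≤ x ∧ x ≤ n) →
    pl = (Vs.card : Int) →
    1 ≤ curr → curr ≤ n → curr ∉ Vs →
    (prev = 0 ∨ (prev ∈ Vs ∧ prev ∈ pvNbrs E curr)) →
    (prev = 0 → Vs = ∅ ∧ (pvNbrs E curr).length = 1) →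
    (∀ x ∈ Vs, ∀ y ∈ pvNbrs E x, y ∈ Vs ∨ y = curr) →
    (∀ x ∈ Vs, pvReach E s x) → pvReach E s curr →
    (s ∈ Vs ∨ s = curr) →
    ((n : Int) + 1 ≤ (Vs.card : Int) + (fuel : Int)) →
    ∃ W : Finset Int,
      pvWalk matrix fuel visited pl prev curr = (W.card : Int)
      ∧ (∀ z : Int, z ∈ W ↔ pvReach E s z) := by
  intro fuel
  induction fuel with
  | zero =>
    intro visited pl prev curr Vs _ _ hVb _ hc1 hc2 hcV _ _ _ _ _ _ hfuel
    exfalso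
    have hsub : insert curr Vs ⊆ Finset.Icc 1 n := by
      intro x hx
      rcases Finset.mem_insert.1 hx with rfl | hx
      · simp [Finset.mem_Icc]; omega
      · have := hVb x hx; simp [Finset.mem_Icc]; omega
    have hcard : (insert curr Vs).card ≤ (Finset.Icc (1:Int) n).card := Finset.card_le_card hsub
    rw [Finset.card_insert_of_notMem hcV, Int.card_Icc] at hcard
    omega
  | succ fuel ih =>
    intro visited pl prev curr Vs hvlen hVchar hVb hpl hc1 hc2 hcV hprev hst hclosed hreach hreachc hsin hfuel
    have hcur0 : ¬ curr = 0 := by omega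
    simp only [pvWalk, if_neg hcur0]
    have hmatc : pvGetL matrix curr = pvNbrs E curr := hmat curr hc1 hc2
    have hVchar' : ∀ i : Int, 0 ≤ i →
        (pvGetB (PySem.List.pySetD visited curr true) i = true ↔ i ∈ insert curr Vs) := by
      intro i hi
      rw [pvGetB, pvGetD_setD _ curr i _ _ (by omega) (by omega) hi]
      by_cases hic : i = curr
      · simp [hic]
      · have := hVchar i hi
        rw [pvGetB] at this
        simp [hic, this]
    have hVb' : ∀ x ∈ insert curr Vs, 1 ≤ x ∧ x ≤ n := by
      intro x hx
      rcases Finset.mem_insert.1 hx with rfl | hx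
      · exact ⟨hc1, hc2⟩
      · exact hVb x hx
    cases hfind : (pvGetL matrix curr).find?
        (fun nb => nb != prev && !(pvGetB (PySem.List.pySetD visited curr true) nb)) with
    | none =>
      simp only [Option.getD_none]
      rw [pvWalk_zero]
      refine ⟨insert curr Vs, ?_, ?_⟩
      · rw [Finset.card_insert_of_notMem hcV, hpl]; push_cast; ring
      · have hWclosed : ∀ x ∈ insert curr Vs, ∀ y ∈ pvNbrs E x, y ∈ insert curr Vs := by
          intro x hx y hy
          rcases Finset.mem_insert.1 hx with rfl | hx
          · have hyb := pvNbrs_bounds hE hy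
            have hpredf := List.find?_eq_none.1 hfind y (hmatc ▸ hy)
            simp only [Bool.and_eq_false_iff, bne_eq_false_iff_eq, Bool.not_eq_false',
              Bool.not_eq_true] at hpredf
            rcases hpredf with rfl | hvis
            · rcases hprev with h0 | ⟨hpV, _⟩
              · omega
              · exact Finset.mem_insert_of_mem hpV
            · exact (hVchar' y (by omega)).1 hvis
          · rcases hclosed x hx y hy with h | rfl
            · exact Finset.mem_insert_of_mem h
            · exact Finset.mem_insert_self _ _
        intro z
        constructor
        · intro hz
          rcases Finset.mem_insert.1 hz with rfl | hz
          · exact hreachc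
          · exact hreach _ hz
        · intro hz
          induction hz with
          | refl =>
            rcases hsin with h | rfl
            · exact Finset.mem_insert_of_mem h
            · exact Finset.mem_insert_self _ _
          | tail _ hadj ihz =>
            rename_i b c _
            exact hWclosed b ihz c (pvMem_nbrs.2 hadj)
    | some t =>
      simp only [Option.getD_some]
      have htmem : t ∈ pvNbrs E curr := hmatc ▸ List.mem_of_find?_eq_some hfind
      have htpred := List.find?_some hfind
      simp only [Bool.and_eq_true, bne_iff_ne, ne_eq, Bool.not_eq_true'] at htpred
      obtain ⟨htprev, htvis⟩ := htpred
      have htb := pvNbrs_bounds hE htmem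
      have htVs' : t ∉ insert curr Vs := by
        intro h
        have := (hVchar' t (by omega)).2 h
        rw [this] at htvis
        simp at htvis
      have hadjct : pvAdj E curr t := pvMem_nbrs.1 htmem
      refine ih (PySem.List.pySetD visited curr true) (pl+1) curr t (insert curr Vs)
        (by rw [PySem.List.length_pySetD]; exact hvlen)
        hVchar' hVb'
        (by rw [Finset.card_insert_of_notMem hcV, hpl]; push_cast; ring)
        htb.1 htb.2 htVs'
        (Or.inr ⟨Finset.mem_insert_self _ _, pvMem_nbrs.2 (pvAdj_symm E hadjct)⟩)
        (by intro h; omega)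
        ?_
        (by
          intro x hx
          rcases Finset.mem_insert.1 hx with rfl | hx
          · exact hreachc
          · exact hreach x hx)
        (hreachc.tail hadjct)
        (by
          rcases hsin with h | rfl
          · exact Or.inl (Finset.mem_insert_of_mem h)
          · exact Or.inl (Finset.mem_insert_self _ _))
        (by rw [Finset.card_insert_of_notMem hcV]; push_cast; push_cast at hfuel; omega)
      -- the closure invariant for the new state
      intro x hx y hy
      rcases Finset.mem_insert.1 hx with rfl | hx
      · -- x = curr : the degree-slot argument
        rcases hprev with h0 | ⟨hpV, hpnb⟩
        · obtain ⟨hVempty, hlen1⟩ := hst h0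
          obtain ⟨a, ha⟩ := List.length_eq_one_iff.1 hlen1
          rw [ha] at htmem hy
          simp at htmem hy
          right; rw [hy, ← htmem]
        · have hdegc := hdeg x hc1 hc2
          rcases pvTwoMem hdegc hpnb htmem htprev y hy with rfl | rfl
          · exact Or.inl (Finset.mem_insert_of_mem hpV)
          · right; rfl
      · rcases hclosed x hx y hy with h | rfl
        · exact Or.inl (Finset.mem_insert_of_mem h)
        · exact Or.inl (Finset.mem_insert_self _ _)

-- ===== closure (B) : Finset model =====
def pvFStep (S : Finset Int) (p : Int × Int) : Finset Int :=
  if p.1 ∈ S ∨ p.2 ∈ S then insert p.1 (insert p.2 S) else S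

def pvF (E : List (Int × Int)) (S : Finset Int) : Finset Int := E.foldl pvFStep S

theorem pvFStep_mono (S : Finset Int) (p : Int × Int) : S ⊆ pvFStep S p := by
  unfold pvFStep; split
  · intro x hx; simp [hx]
  · exact Finset.Subset.refl S

theorem pvFoldl_mono (l : List (Int × Int)) (S : Finset Int) : S ⊆ l.foldl pvFStep S := by
  induction l generalizing S with
  | nil => exact Finset.Subset.refl S
  | cons p l ih => exact (pvFStep_mono S p).trans (ih _)

theorem pvFoldl_fix_closed :
    ∀ (l : List (Int × Int)) (S : Finset Int), l.foldl pvFStep S = S →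
    ∀ p ∈ l, (p.1 ∈ S ∨ p.2 ∈ S) → p.1 ∈ S ∧ p.2 ∈ S := by
  intro l
  induction l with
  | nil => intro S _ p hp; simp at hp
  | cons q l ih =>
    intro S h p hp hcond
    rw [List.foldl_cons] at h
    have heq : pvFStep S q = S := by
      have h2 : pvFStep S q ⊆ S := by
        conv_rhs => rw [← h]
        exact pvFoldl_mono l (pvFStep S q)
      exact subset_antisymm h2 (pvFStep_mono S q)
    rcases List.mem_cons.1 hp with rfl | hp
    · unfold pvFStep at heq
      rw [if_pos hcond] at heq
      exact ⟨heq ▸ Finset.mem_insert_self _ _,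
        heq ▸ Finset.mem_insert_of_mem (Finset.mem_insert_self _ _)⟩
    · exact ih S (by rw [heq] at h; exact h) p hp hcond

theorem pvF_fix_closed {E : List (Int × Int)} {S : Finset Int} (hfix : pvF E S = S) :
    ∀ p ∈ E, (p.1 ∈ S ∨ p.2 ∈ S) → p.1 ∈ S ∧ p.2 ∈ S :=
  pvFoldl_fix_closed E S hfix

theorem pvFStep_sound {E : List (Int × Int)} {S : Finset Int} {q : Int × Int}
    (hq : q ∈ E) (hS : ∀ x ∈ S, pvReach E 1 x) : ∀ x ∈ pvFStep S q, pvReach E 1 x := by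
  unfold pvFStep
  split
  · rename_i hcond
    have hadj : pvAdj E q.1 q.2 := Or.inl (by simpa using hq)
    have h12 : pvReach E 1 q.1 → pvReach E 1 q.2 := fun h => h.tail hadj
    have h21 : pvReach E 1 q.2 → pvReach E 1 q.1 := fun h => h.tail (pvAdj_symm E hadj)
    intro x hx
    rcases Finset.mem_insert.1 hx with rfl | hx
    · rcases hcond with h | h
      · exact hS _ h
      · exact h21 (hS _ h)
    rcases Finset.mem_insert.1 hx with rfl | hx
    · rcases hcond with h | h
      · exact h12 (hS _ h)
      · exact hS _ h
    · exact hS _ hx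
  · exact hS

theorem pvF_sound {E : List (Int × Int)} {S : Finset Int}
    (hS : ∀ x ∈ S, pvReach E 1 x) : ∀ x ∈ pvF E S, pvReach E 1 x := by
  have hgen : ∀ (l : List (Int × Int)), (∀ p ∈ l, p ∈ E) →
      ∀ (S : Finset Int), (∀ x ∈ S, pvReach E 1 x) → ∀ x ∈ l.foldl pvFStep S, pvReach E 1 x := by
    intro l
    induction l with
    | nil => intro _ S hS x hx; exact hS x hx
    | cons q l ih =>
      intro hsub S hS
      exact ih (fun p hp => hsub p (by simp [hp])) (pvFStep S q)
        (pvFStep_sound (hsub q (by simp)) hS)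
  exact hgen E (fun p hp => hp) S hS

theorem pvF_bounds {n : Int} {E : List (Int × Int)}
    (hE : ∀ p ∈ E, 1 ≤ p.1 ∧ p.1 ≤ n ∧ 1 ≤ p.2 ∧ p.2 ≤ n)
    {S : Finset Int} (hS : ∀ x ∈ S, 1 ≤ x ∧ x ≤ n) :
    ∀ x ∈ pvF E S, 1 ≤ x ∧ x ≤ n := by
  have hgen : ∀ (l : List (Int × Int)), (∀ p ∈ l, 1 ≤ p.1 ∧ p.1 ≤ n ∧ 1 ≤ p.2 ∧ p.2 ≤ n) →
      ∀ (S : Finset Int), (∀ x ∈ S, 1 ≤ x ∧ x ≤ n) → ∀ x ∈ l.foldl pvFStep S, 1 ≤ x ∧ x ≤ n := by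
    intro l
    induction l with
    | nil => intro _ S hS x hx; exact hS x hx
    | cons q l ih =>
      intro hsub S hS
      refine ih (fun p hp => hsub p (by simp [hp])) (pvFStep S q) ?_
      have hq := hsub q (by simp)
      unfold pvFStep
      split
      · intro x hx
        rcases Finset.mem_insert.1 hx with rfl | hx
        · exact ⟨hq.1, hq.2.1⟩
        rcases Finset.mem_insert.1 hx with rfl | hx
        · exact ⟨hq.2.2.1, hq.2.2.2⟩
        · exact hS x hx
      · exact hS
  exact hgen E hE S hS

-- list-level round matches the Finset step
theorem pvRound_char {n : Int} {E : List (Int × Int)}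
    (hE : ∀ p ∈ E, 1 ≤ p.1 ∧ p.1 ≤ n ∧ 1 ≤ p.2 ∧ p.2 ≤ n)
    (r : List Bool) (S : Finset Int)
    (hlen : (r.length : Int) = n + 1)
    (hchar : ∀ i : Int, 0 ≤ i → (pvGetB r i = true ↔ i ∈ S))
    (hS : ∀ x ∈ S, 1 ≤ x ∧ x ≤ n) :
    ((pvRound r E).length : Int) = n + 1
    ∧ (∀ i : Int, 0 ≤ i → (pvGetB (pvRound r E) i = true ↔ i ∈ pvF E S)) := by
  have hgen : ∀ (l : List (Int × Int)), (∀ p ∈ l, 1 ≤ p.1 ∧ p.1 ≤ n ∧ 1 ≤ p.2 ∧ p.2 ≤ n) →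
      ∀ (r : List Bool) (S : Finset Int), (r.length : Int) = n + 1 →
      (∀ i : Int, 0 ≤ i → (pvGetB r i = true ↔ i ∈ S)) →
      (((l.foldl (fun r p =>
          if pvGetB r p.1 || pvGetB r p.2 then
            PySem.List.pySetD (PySem.List.pySetD r p.1 true) p.2 true
          else r) r).length : Int) = n + 1
      ∧ (∀ i : Int, 0 ≤ i → (pvGetB (l.foldl (fun r p =>
          if pvGetB r p.1 || pvGetB r p.2 then
            PySem.List.pySetD (PySem.List.pySetD r p.1 true) p.2 true
          else r) r) i = true ↔ i ∈ l.foldl pvFStep S))) := by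
    intro l
    induction l with
    | nil => intro _ r S hlen hchar; exact ⟨hlen, hchar⟩
    | cons p l ih =>
      intro hsub r S hlen hchar
      have hp := hsub p (by simp)
      have hcond : (pvGetB r p.1 || pvGetB r p.2) = true ↔ (p.1 ∈ S ∨ p.2 ∈ S) := by
        rw [Bool.or_eq_true, hchar p.1 (by omega), hchar p.2 (by omega)]
      rw [List.foldl_cons, List.foldl_cons]
      by_cases hc : p.1 ∈ S ∨ p.2 ∈ S
      · rw [if_pos (hcond.2 hc)]
        unfold pvFStep
        rw [if_pos hc]
        refine ih (fun q hq => hsub q (by simp [hq])) _ _ ?_ ?_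
        · rw [PySem.List.length_pySetD, PySem.List.length_pySetD]; exact hlen
        · intro i hi
          have hchar' := hchar i hi
          rw [pvGetB] at hchar' ⊢
          rw [pvGetD_setD _ p.2 i _ _ (by omega) (by rw [PySem.List.length_pySetD]; omega) hi,
              pvGetD_setD _ p.1 i _ _ (by omega) (by omega) hi]
          by_cases h2 : i = p.2 <;> by_cases h1 : i = p.1 <;>
            simp [h1, h2, Finset.mem_insert, hchar']
      · rw [if_neg (fun h => hc (hcond.1 h))]
        unfold pvFStep
        rw [if_neg hc]
        exact ih (fun q hq => hsub q (by simp [hq])) r S hlen hchar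
  exact hgen E hE r S hlen hchar

theorem pvIter_fix {n : Int} {E : List (Int × Int)}
    (hE : ∀ p ∈ E, 1 ≤ p.1 ∧ p.1 ≤ n ∧ 1 ≤ p.2 ∧ p.2 ≤ n) (hn : 2 ≤ n) :
    pvF E ((pvF E)^[n.toNat] {1}) = (pvF E)^[n.toNat] {1} := by
  have hbk : ∀ k : Nat, ∀ x ∈ (pvF E)^[k] {1}, 1 ≤ x ∧ x ≤ n := by
    intro k
    induction k with
    | zero => intro x hx; simp at hx; omega
    | succ k ih =>
      rw [Function.iterate_succ_apply']
      exact pvF_bounds hE ih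
  have hsubIcc : ∀ k : Nat, (pvF E)^[k] {1} ⊆ Finset.Icc 1 n := by
    intro k x hx
    have := hbk k x hx
    simp [Finset.mem_Icc]; omega
  have hcard : ∀ k : Nat, ((pvF E)^[k] {1}).card ≤ n.toNat := by
    intro k
    calc ((pvF E)^[k] {1}).card ≤ (Finset.Icc (1:Int) n).card := Finset.card_le_card (hsubIcc k)
    _ = n.toNat := by rw [Int.card_Icc]; omega
  have hdisj : ∀ k : Nat, pvF E ((pvF E)^[k] {1}) = (pvF E)^[k] {1}
      ∨ k + 1 ≤ ((pvF E)^[k] {1}).card := by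
    intro k
    induction k with
    | zero => right; simp
    | succ k ih =>
      rcases ih with hfix | hcd
      · left
        rw [Function.iterate_succ_apply', hfix, hfix]
      · by_cases hfx : pvF E ((pvF E)^[k] {1}) = (pvF E)^[k] {1}
        · left; rw [Function.iterate_succ_apply', hfx, hfx]
        · right
          rw [Function.iterate_succ_apply']
          have hss : (pvF E)^[k] {1} ⊂ pvF E ((pvF E)^[k] {1}) :=
            (pvFoldl_mono E _).ssubset_of_ne (fun h => hfx h.symm)
          have := Finset.card_lt_card hss
          omega
  rcases hdisj n.toNat with hfix | hcd
  · exact hfix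
  · have := hcard n.toNat
    omega

theorem pvClosure_component {n : Int} {E : List (Int × Int)}
    (hE : ∀ p ∈ E, 1 ≤ p.1 ∧ p.1 ≤ n ∧ 1 ≤ p.2 ∧ p.2 ≤ n) (hn : 2 ≤ n) :
    ∀ z : Int, z ∈ (pvF E)^[n.toNat] {1} ↔ pvReach E 1 z := by
  have hone : (1:Int) ∈ (pvF E)^[n.toNat] {1} := by
    have : ∀ k : Nat, (1:Int) ∈ (pvF E)^[k] {1} := by
      intro k
      induction k with
      | zero => simp
      | succ k ih => rw [Function.iterate_succ_apply']; exact pvFoldl_mono E _ ih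
    exact this n.toNat
  have hsound : ∀ z ∈ (pvF E)^[n.toNat] {1}, pvReach E 1 z := by
    have : ∀ k : Nat, ∀ z ∈ (pvF E)^[k] {1}, pvReach E 1 z := by
      intro k
      induction k with
      | zero => intro z hz; simp at hz; subst hz; exact Relation.ReflTransGen.refl
      | succ k ih => rw [Function.iterate_succ_apply']; exact pvF_sound ih
    exact this n.toNat
  have hclosed := pvF_fix_closed (pvIter_fix hE hn)
  intro z
  constructor
  · exact hsound z
  · intro hreach
    induction hreach with
    | refl => exact hone
    | tail _ hadj ih =>
      rename_i b c _
      rcases hadj with h | h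
      · exact (hclosed (b, c) h (Or.inl ih)).2
      · exact (hclosed (c, b) h (Or.inr ih)).1

theorem pvIter_bounds {n : Int} {E : List (Int × Int)}
    (hE : ∀ p ∈ E, 1 ≤ p.1 ∧ p.1 ≤ n ∧ 1 ≤ p.2 ∧ p.2 ≤ n) (hn : 2 ≤ n) :
    ∀ k : Nat, ∀ x ∈ (pvF E)^[k] {1}, 1 ≤ x ∧ x ≤ n := by
  intro k
  induction k with
  | zero => intro x hx; simp at hx; omega
  | succ k ih =>
    rw [Function.iterate_succ_apply']
    exact pvF_bounds hE ih

theorem pvRounds_char {n : Int} {E : List (Int × Int)}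
    (hE : ∀ p ∈ E, 1 ≤ p.1 ∧ p.1 ≤ n ∧ 1 ≤ p.2 ∧ p.2 ≤ n) (hn : 2 ≤ n) :
    ∀ k : Nat,
    ((((List.range k).foldl (fun r _ => pvRound r E)
        (PySem.List.pySetD (List.replicate (n+1).toNat false) 1 true)).length : Int) = n + 1)
    ∧ (∀ i : Int, 0 ≤ i →
        (pvGetB ((List.range k).foldl (fun r _ => pvRound r E)
          (PySem.List.pySetD (List.replicate (n+1).toNat false) 1 true)) i = true
          ↔ i ∈ (pvF E)^[k] {1})) := by
  intro k
  induction k with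
  | zero =>
    constructor
    · simp [PySem.List.length_pySetD]; omega
    · intro i hi
      rw [List.range_zero, List.foldl_nil, Function.iterate_zero_apply, pvGetB,
        pvGetD_setD _ 1 i _ _ (by omega) (by simp; omega) hi]
      by_cases hi1 : i = 1
      · simp [hi1]
      · rw [if_neg hi1, pvGetD_replicate _ _ i hi]
        simp [hi1]
  | succ k ih =>
    rw [List.range_succ, List.foldl_append, List.foldl_cons, List.foldl_nil,
      Function.iterate_succ_apply']
    exact pvRound_char hE _ _ ih.1 ih.2 (pvIter_bounds hE hn k)

theorem pvCount_nbrs (E : List (Int × Int)) (i : Int) :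
    ((E.flatMap fun p => [p.1, p.2]).count i) = (pvNbrs E i).length := by
  induction E with
  | nil => simp [pvNbrs]
  | cons p E ih =>
    simp only [pvNbrs, List.flatMap_cons, List.count_append, List.length_append]
    rw [← pvNbrs, ih]
    have hhead : List.count i [p.1, p.2]
        = ((if p.1 = i then [p.2] else []) ++ (if p.2 = i then [p.1] else [])).length := by
      simp only [List.length_append, List.count_cons, List.count_nil]
      split_ifs <;> simp_all
    rw [hhead, List.length_append]

theorem pvSymmReach (E : List (Int × Int)) : Symmetric (pvReach E) :=
  Relation.ReflTransGen.symmetric (fun _ _ h => pvAdj_symm E h)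

-- A's walk result compared with n, restated as connectivity from s
theorem pvCard_iff {n : Int} {E : List (Int × Int)} {s : Int} {W : Finset Int}
    (hE : ∀ p ∈ E, 1 ≤ p.1 ∧ p.1 ≤ n ∧ 1 ≤ p.2 ∧ p.2 ≤ n)
    (hn : 2 ≤ n) (hs1 : 1 ≤ s) (hs2 : s ≤ n)
    (hW : ∀ z : Int, z ∈ W ↔ pvReach E s z) :
    ((W.card : Int) = n ↔ ∀ z : Int, 1 ≤ z → z ≤ n → pvReach E s z) := by
  have hWsub : W ⊆ Finset.Icc 1 n := by
    intro z hz
    have := pvReach_bounds hE hs1 hs2 ((hW z).1 hz)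
    simp [Finset.mem_Icc]; omega
  have hIcc : (Finset.Icc (1:Int) n).card = n.toNat := by rw [Int.card_Icc]; omega
  constructor
  · intro hcard z hz1 hz2
    have heq : W = Finset.Icc 1 n := by
      apply Finset.eq_of_subset_of_card_le hWsub
      omega
    exact (hW z).1 (heq ▸ (by simp [Finset.mem_Icc]; omega : z ∈ Finset.Icc 1 n))
  · intro hall
    have heq : W = Finset.Icc 1 n := by
      apply subset_antisymm hWsub
      intro z hz
      simp [Finset.mem_Icc] at hz
      exact (hW z).2 (hall z hz.1 hz.2)
    rw [heq]
    omega

-- ===== VERDICT (by name: the statement is the Claim_ definition above) =====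
theorem is_chain_spec : Claim_equal_is_chain := by
  intro n m E _ hpre
  unfold Spec_is_chain
  by_cases h1 : n = 1
  · simp [is_chain, is_chain_alt, h1]
  by_cases h2 : m ≠ n - 1
  · simp [is_chain, is_chain_alt, h1, h2]
  have hE : ∀ p ∈ E, 1 ≤ p.1 ∧ p.1 ≤ n ∧ 1 ≤ p.2 ∧ p.2 ≤ n := by
    rcases hpre with h | h | h
    · exact absurd h h1
    · exact absurd h h2
    · exact h
  simp only [is_chain, is_chain_alt, if_neg h1, if_neg h2]
  by_cases hn : n ≤ 0
  · have hEnil : E = [] := by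
      cases E with
      | nil => rfl
      | cons p E => exact absurd (hE p (by simp)) (by omega)
    subst hEnil
    simp [pvDegLoop, pvEndsLoop, PySem.List.pyRange_one_eq_nil (by omega : n + 1 ≤ 1)]
  have hn2 : 2 ≤ n := by omega
  -- the adjacency matrix rows are the neighbour lists
  have hmlen : ((List.replicate (n+1).toNat ([] : List Int)).length : Int) = n + 1 := by
    simp; omega
  have hmat : ∀ i : Int, 1 ≤ i → i ≤ n →
      pvGetL (E.foldl pvAddEdge (List.replicate (n+1).toNat [])) i = pvNbrs E i := by
    intro i hi1 hi2
    rw [pvMatrix_get E _ hmlen hE i (by omega), pvGetL, pvGetD_replicate _ _ i (by omega)]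
    simp
  -- the degree dict agrees with the neighbour-list lengths
  have hdict : ∀ i : Int,
      ((E.flatMap fun p => [p.1, p.2]).foldl (fun d x => d.modify x 0 (· + 1))
        PySem.Dict.empty).getD i 0 = ((pvNbrs E i).length : Int) := by
    intro i
    rw [PySem.Dict.getD_foldl_modify_add_one, PySem.Dict.getD_empty, pvCount_nbrs]
    ring
  -- both degree loops compute the same option
  have hloopA : pvDegLoop (E.foldl pvAddEdge (List.replicate (n+1).toNat [])) n
      = (if ∀ i ∈ PySem.List.pyRange 1 (n+1) 1, ((pvNbrs E i).length : Int) ≤ 2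
         then some (0 + ((PySem.List.pyRange 1 (n+1) 1).countP
            (fun i => decide (((pvNbrs E i).length : Int) = 1)) : Int))
         else none) := by
    rw [pvDegLoop, PySem.List.foldl_congr_mem _ _
      (fun acc i =>
        match acc with
        | none => none
        | some c => if ((pvNbrs E i).length : Int) > 2 then none
                    else if ((pvNbrs E i).length : Int) = 1 then some (c+1) else some c) _
      (by
        intro acc i hi
        have hib := PySem.List.mem_pyRange_one.1 hi
        cases acc with
        | none => rfl
        | some c =>
          rw [hmat i hib.1 (by omega)]
          have e1 : ((pvNbrs E i).length > 2) = (((pvNbrs E i).length : Int) > 2) :=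
            propext (by omega)
          have e2 : ((pvNbrs E i).length = 1) = (((pvNbrs E i).length : Int) = 1) :=
            propext (by omega)
          simp only [e1, e2])]
    exact pvOptLoop_char (fun i => ((pvNbrs E i).length : Int)) _ 0
  have hloopB : pvEndsLoop ((E.flatMap fun p => [p.1, p.2]).foldl
        (fun d x => d.modify x 0 (· + 1)) PySem.Dict.empty) n
      = (if ∀ i ∈ PySem.List.pyRange 1 (n+1) 1, ((pvNbrs E i).length : Int) ≤ 2
         then some (0 + ((PySem.List.pyRange 1 (n+1) 1).countP
            (fun i => decide (((pvNbrs E i).length : Int) = 1)) : Int))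
         else none) := by
    rw [pvEndsLoop, PySem.List.foldl_congr_mem _ _
      (fun acc i =>
        match acc with
        | none => none
        | some c => if ((pvNbrs E i).length : Int) > 2 then none
                    else if ((pvNbrs E i).length : Int) = 1 then some (c+1) else some c) _
      (by
        intro acc i _
        cases acc with
        | none => rfl
        | some c => simp only [hdict i])]
    exact pvOptLoop_char (fun i => ((pvNbrs E i).length : Int)) _ 0
  have hloops : pvDegLoop (E.foldl pvAddEdge (List.replicate (n+1).toNat [])) n
      = pvEndsLoop ((E.flatMap fun p => [p.1, p.2]).foldl
          (fun d x => d.modify x 0 (· + 1)) PySem.Dict.empty) n := by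
    rw [hloopA, hloopB]
  rw [hloops]
  cases hlp : pvEndsLoop ((E.flatMap fun p => [p.1, p.2]).foldl
      (fun d x => d.modify x 0 (· + 1)) PySem.Dict.empty) n with
  | none => rfl
  | some c =>
    change (if c ≠ 2 then false else _) = (if c ≠ 2 then false else _)
    by_cases hc : c ≠ 2
    · rw [if_pos hc, if_pos hc]
    rw [if_neg hc, if_neg hc]
    have hc2 : c = 2 := by omega
    subst hc2
    -- decode what the shared loop value says
    rw [hloopB] at hlp
    have hall : ∀ i ∈ PySem.List.pyRange 1 (n+1) 1, ((pvNbrs E i).length : Int) ≤ 2 := by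
      by_contra h
      rw [if_neg h] at hlp
      simp at hlp
    rw [if_pos hall] at hlp
    have hcount : ((PySem.List.pyRange 1 (n+1) 1).countP
        (fun i => decide (((pvNbrs E i).length : Int) = 1)) : Int) = 2 := by
      have := Option.some.inj hlp
      omega
    have hdegle : ∀ i : Int, 1 ≤ i → i ≤ n → (pvNbrs E i).length ≤ 2 := by
      intro i hi1 hi2
      have := hall i (PySem.List.mem_pyRange_one.2 ⟨hi1, by omega⟩)
      omega
    -- A's start-vertex search succeeds
    cases hfind : (PySem.List.pyRange 1 (n+1) 1).find?
        (fun i => (pvGetL (E.foldl pvAddEdge (List.replicate (n+1).toNat [])) i).length == 1) with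
    | none =>
      exfalso
      have hpos : 0 < (PySem.List.pyRange 1 (n+1) 1).countP
          (fun i => decide (((pvNbrs E i).length : Int) = 1)) := by omega
      obtain ⟨i, hiR, hip⟩ := List.countP_pos_iff.1 hpos
      have hib := PySem.List.mem_pyRange_one.1 hiR
      have := List.find?_eq_none.1 hfind i hiR
      rw [hmat i hib.1 (by omega)] at this
      simp at this hip
      omega
    | some start =>
      have hsmem := List.mem_of_find?_eq_some hfind
      have hsb := PySem.List.mem_pyRange_one.1 hsmem
      have hslen : (pvNbrs E start).length = 1 := by
        have := List.find?_some hfind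
        rw [hmat start hsb.1 (by omega)] at this
        simpa using this
      -- run the walk invariant
      obtain ⟨W, hWeq, hWmem⟩ :=
        pvWalk_inv hE hmat hdegle hsb.1 (by omega) ((n+1).toNat)
          (List.replicate (n+1).toNat false) 0 0 start (∅ : Finset Int)
          (by simp; omega)
          (by
            intro i hi
            rw [pvGetB, pvGetD_replicate _ _ i hi]
            simp)
          (by simp)
          (by simp)
          hsb.1 (by omega) (by simp)
          (Or.inl rfl)
          (fun _ => ⟨rfl, hslen⟩)
          (by simp)
          (by simp)
          Relation.ReflTransGen.refl
          (Or.inr rfl)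
          (by omega)
      change (decide (pvWalk (List.foldl pvAddEdge (List.replicate (n + 1).toNat []) E)
          ((n + 1).toNat) (List.replicate (n + 1).toNat false) 0 0 start = n)) = _
      rw [hWeq]
      -- B's closure computes the component of 1
      have hrounds := pvRounds_char hE hn2 n.toNat
      have hcomp := pvClosure_component hE hn2
      rw [Bool.eq_iff_iff, decide_eq_true_iff, List.all_eq_true]
      rw [pvCard_iff hE hn2 hsb.1 (by omega) hWmem]
      constructor
      · intro h i hiR
        have hib := PySem.List.mem_pyRange_one.1 hiR
        refine (hrounds.2 i (by omega)).2 ((hcomp i).2 ?_)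
        have h1s : pvReach E 1 start := pvSymmReach E (h 1 (by omega) (by omega))
        exact h1s.trans (h i hib.1 (by omega))
      · intro h z hz1 hz2
        have hget : ∀ i : Int, 1 ≤ i → i ≤ n → pvReach E 1 i := by
          intro i hi1 hi2
          exact (hcomp i).1 ((hrounds.2 i (by omega)).1
            (h i (PySem.List.mem_pyRange_one.2 ⟨hi1, by omega⟩)))
        have hs1 : pvReach E start 1 := pvSymmReach E (hget start hsb.1 (by omega))
        exact hs1.trans (hget z hz1 hz2)
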